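-- pv_equiv track=rewrite | github.com/EmilienBidet/christmas-tree | chrismas_tree.py | get_last_size
-- ===== SOURCE A (Python) =====
-- def get_last_size(floors_number=3, branch_number_per_floor=4):
--     leafs_on_top = 1
--     modificateur_leaf = 2
--     for floor in range(floors_number):
--         leafs = leafs_on_top
--         for branch in range(branch_number_per_floor):
--             leafs += modificateur_leaf
--         leafs_on_top += 2
--         modificateur_leaf += 2
--     return leafs - modificateur_leaf + 2
-- ===== SOURCE B (Python) =====
-- def get_last_size(floors_number=3, branch_number_per_floor=4):
--     branches = branch_number_per_floor if branch_number_per_floor > 0 else 0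
--     return 2 * floors_number * branches - 1
-- ===== Notes on version B (the rewrite author's own statement) =====
-- stated objective: faster
-- what changed: Replaced the two nested accumulation loops by the closed-form formula 2*floors_number*max(branch_number_per_floor,0) - 1.
import Mathlib
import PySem

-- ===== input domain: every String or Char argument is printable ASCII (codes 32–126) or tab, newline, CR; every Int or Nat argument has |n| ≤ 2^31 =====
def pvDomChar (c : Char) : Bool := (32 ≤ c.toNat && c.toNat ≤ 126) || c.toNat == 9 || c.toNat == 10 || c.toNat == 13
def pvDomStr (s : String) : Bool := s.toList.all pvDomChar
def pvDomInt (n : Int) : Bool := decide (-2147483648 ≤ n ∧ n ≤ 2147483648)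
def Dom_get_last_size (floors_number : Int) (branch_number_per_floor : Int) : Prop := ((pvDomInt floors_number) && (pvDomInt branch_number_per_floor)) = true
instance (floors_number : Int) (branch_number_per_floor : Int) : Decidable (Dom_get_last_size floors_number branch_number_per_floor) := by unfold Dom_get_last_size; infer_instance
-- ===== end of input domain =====

-- B replaces the nested accumulation loops by a closed-form formula (O(1) instead of O(floors*branches)).

-- ===== PORT A =====
-- State: (leafs, leafs_on_top, modificateur_leaf); 'leafs' starts at 0 standing for Python's
-- unbound variable — Pre_ requires floors_number ≥ 1, so the loop always assigns it.
def get_last_size (floors_number : Int) (branch_number_per_floor : Int) : Int :=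
  let s := (PySem.List.pyRange 0 floors_number 1).foldl
    (fun (s : Int × Int × Int) _ =>
      let leafs := (PySem.List.pyRange 0 branch_number_per_floor 1).foldl
        (fun l _ => l + s.2.2) s.2.1
      (leafs, s.2.1 + 2, s.2.2 + 2))
    (0, 1, 2)
  s.1 - s.2.2 + 2

-- ===== PORT B =====
def get_last_size_alt (floors_number : Int) (branch_number_per_floor : Int) : Int :=
  let branches := if branch_number_per_floor > 0 then branch_number_per_floor else 0
  2 * floors_number * branches - 1

-- ===== PRECONDITION & SPEC =====
-- Pre_ excludes floors_number ≤ 0, on which A raises UnboundLocalError ('leafs' never assigned).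
def Pre_get_last_size (floors_number : Int) (branch_number_per_floor : Int) : Prop :=
  1 ≤ floors_number
instance (floors_number : Int) (branch_number_per_floor : Int) : Decidable (Pre_get_last_size floors_number branch_number_per_floor) := by unfold Pre_get_last_size; infer_instance
def pvWitness_get_last_size : Int × Int := (3, 4)

def Spec_get_last_size (floors_number : Int) (branch_number_per_floor : Int) (out : Int) : Prop := out = get_last_size_alt floors_number branch_number_per_floor
instance (floors_number : Int) (branch_number_per_floor : Int) (out : Int) : Decidable (Spec_get_last_size floors_number branch_number_per_floor out) := by unfold Spec_get_last_size; infer_instance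

-- ===== CLAIM (what is proved, stated in full; the proofs are below) =====
def Claim_equal_get_last_size : Prop := ∀ (floors_number : Int) (branch_number_per_floor : Int), Dom_get_last_size floors_number branch_number_per_floor → Pre_get_last_size floors_number branch_number_per_floor → Spec_get_last_size floors_number branch_number_per_floor (get_last_size floors_number branch_number_per_floor)

-- ===== LEMMAS AND PROOFS =====

-- a foldl whose step ignores the element and adds a constant
theorem foldl_add_const (l : List Int) (c init : Int) :
    l.foldl (fun a _ => a + c) init = init + l.length * c := by
  induction l generalizing init with
  | nil => simp
  | cons x xs ih => simp only [List.foldl_cons, ih, List.length_cons]; push_cast; ring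

-- a foldl whose step ignores the element is an iterate
theorem foldl_ignore {α β : Type} (g : α → α) (l : List β) (init : α) :
    l.foldl (fun s _ => g s) init = g^[l.length] init := by
  induction l generalizing init with
  | nil => simp
  | cons x xs ih => simp only [List.foldl_cons, ih, List.length_cons, Function.iterate_succ_apply]

-- A's outer-loop step, with the inner loop already summed
def stepA (B : Int) (s : Int × Int × Int) : Int × Int × Int :=
  (s.2.1 + B * s.2.2, s.2.1 + 2, s.2.2 + 2)

theorem iterate_stepA (B : Int) (n : Nat) :
    (stepA B)^[n + 1] (0, 1, 2) =
      (1 + 2 * (n : Int) + B * (2 + 2 * (n : Int)),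
       1 + 2 * ((n : Int) + 1), 2 + 2 * ((n : Int) + 1)) := by
  induction n with
  | zero =>
      simp only [Nat.zero_add, Function.iterate_one, stepA]
      refine Prod.ext ?_ (Prod.ext ?_ ?_) <;> push_cast <;> ring
  | succ m ih =>
      rw [Function.iterate_succ_apply', ih]
      simp only [stepA]
      refine Prod.ext ?_ (Prod.ext ?_ ?_) <;> push_cast <;> ring

theorem get_last_size_eq (f b : Int) (hf : 1 ≤ f) :
    get_last_size f b = get_last_size_alt f b := by
  unfold get_last_size get_last_size_alt
  have hstep : (fun (s : Int × Int × Int) _ =>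
      ((PySem.List.pyRange 0 b 1).foldl (fun l _ => l + s.2.2) s.2.1, s.2.1 + 2, s.2.2 + 2))
      = (fun (s : Int × Int × Int) (_ : Int) => stepA ((b - 0).toNat : Int) s) := by
    funext s x
    simp only [stepA, foldl_add_const, PySem.List.length_pyRange_one]
  rw [hstep, foldl_ignore]
  have hn : (PySem.List.pyRange 0 f 1).length = (f - 1).toNat + 1 := by
    rw [PySem.List.length_pyRange_one]; omega
  rw [hn, iterate_stepA]
  have h1 : ((f - 1).toNat : Int) = f - 1 := by omega
  have h2 : (((b - 0).toNat : Int)) = if b > 0 then b else 0 := by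
    split_ifs with h <;> omega
  simp only [h1, h2]
  split_ifs with h <;> ring

-- ===== VERDICT (by name: the statement is the Claim_ definition above) =====
theorem get_last_size_spec : Claim_equal_get_last_size := by
  intro f b _ hpre
  unfold Spec_get_last_size
  exact get_last_size_eq f b hpre
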